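-- pv_equiv track=rewrite | github.com/LilaShiba/2020_lessons | 023_color_change_arr.py | make_small
-- ===== SOURCE A (Python) =====
-- def get_color(arr):
--     '''
--     Returns color of quxes
--     '''
--     if 'R' in arr and 'B' in arr:
--         return 'G'
--     elif 'R' in arr and 'G' in arr:
--         return 'B'
--     else:
--         return 'R'
--
-- def make_small(arr):
--     count = 0
--     while count < len(arr)-1:
--         a = arr[count]
--         b = arr[count+1]
--         if a != b:
--             a = arr.pop(count)
--             b = arr.pop(count)
--             c = get_color([a,b])
--             arr.insert(count,c)
--             count = 0
--         else:
--             count += 1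
--     return arr
-- ===== SOURCE B (Python) =====
-- def get_color(arr):
--     '''
--     Returns color of quxes
--     '''
--     if 'R' in arr and 'B' in arr:
--         return 'G'
--     elif 'R' in arr and 'G' in arr:
--         return 'B'
--     else:
--         return 'R'
--
-- def make_small(arr):
--     # One left-to-right pass with a stack; cascading merges are O(1) amortized.
--     # Note: unlike A, this does not mutate the input list in place.
--     stack = []
--     for x in arr:
--         while stack and stack[-1] != x:
--             x = get_color([stack.pop(), x])
--         stack.append(x)
--     return stack
-- ===== Notes on version B (the rewrite author's own statement) =====
-- stated objective: faster
-- what changed: Replaces the restart-from-zero scan over a mutated array (pop/pop/insert and count reset on every merge) with a single left-to-right pass maintaining a stack of survivors, merging the incoming element into the stack top while they differ.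
import Mathlib
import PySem

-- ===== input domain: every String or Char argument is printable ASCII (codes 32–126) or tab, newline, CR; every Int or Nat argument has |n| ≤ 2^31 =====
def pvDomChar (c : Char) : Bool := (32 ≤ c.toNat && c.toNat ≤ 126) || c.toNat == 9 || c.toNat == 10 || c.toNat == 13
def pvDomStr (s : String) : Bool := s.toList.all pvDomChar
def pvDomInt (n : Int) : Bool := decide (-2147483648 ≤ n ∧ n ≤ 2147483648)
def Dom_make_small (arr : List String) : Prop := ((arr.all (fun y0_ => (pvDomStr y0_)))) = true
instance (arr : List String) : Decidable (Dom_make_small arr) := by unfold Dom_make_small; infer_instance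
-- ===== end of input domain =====

-- B replaces A's restart-from-zero scan over a mutated array with one stack pass (faster,
-- in a timing run); A mutates its argument in place, B does not — the equivalence
-- proved here is about the RETURN value only.

-- ===== PORT A =====
def get_color (arr : List String) : String :=
  if "R" ∈ arr ∧ "B" ∈ arr then "G"
  else if "R" ∈ arr ∧ "G" ∈ arr then "B"
  else "R"

-- the while loop of A; count is always ≥ 0 in Python, so Nat is faithful.
-- arr.pop(count); arr.pop(count) = take count ++ drop (count+2) (indices in range under the guard);
-- arr.insert(count, c) then puts c back at position count.
def make_small_loop (arr : List String) (count : Nat) : List String :=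
  if h : count < arr.length - 1 then
    let a := arr.getD count ""        -- in range under the guard
    let b := arr.getD (count + 1) ""  -- in range under the guard
    if a ≠ b then
      let c := get_color [a, b]
      make_small_loop (arr.take count ++ c :: arr.drop (count + 2)) 0
    else
      make_small_loop arr (count + 1)
  else arr
termination_by (arr.length, arr.length - count)
decreasing_by
  · left
    simp [List.length_take, List.length_drop]
    omega
  · right
    omega

def make_small (arr : List String) : List String := make_small_loop arr 0

-- ===== PORT B =====
-- the inner while loop of B: merge x into the stack (head = top) while the top differs
def cascade (stack : List String) (x : String) : List String :=
  match stack with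
  | t :: rest => if t ≠ x then cascade rest (get_color [t, x]) else x :: t :: rest
  | [] => [x]

def make_small_alt (arr : List String) : List String :=
  (arr.foldl cascade []).reverse

-- ===== PRECONDITION & SPEC =====
def Spec_make_small (arr : List String) (out : List String) : Prop := out = make_small_alt arr
instance (arr : List String) (out : List String) : Decidable (Spec_make_small arr out) := by unfold Spec_make_small; infer_instance

-- ===== CLAIM (what is proved, stated in full; the proofs are below) =====
def Claim_equal_make_small : Prop := ∀ (arr : List String), Dom_make_small arr → Spec_make_small arr (make_small arr)

-- ===== LEMMAS AND PROOFS =====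

theorem cascade_replicate (n : Nat) (a : String) :
    cascade (List.replicate n a) a = List.replicate (n + 1) a := by
  cases n <;> simp [cascade, List.replicate_succ]

-- pushing elements equal to the whole stack just stacks them
theorem foldl_cascade_replicate (n : Nat) (a : String) :
    List.foldl cascade [] (List.replicate n a) = List.replicate n a := by
  induction n with
  | zero => rfl
  | succ k ih =>
    rw [List.replicate_succ' (n := k), List.foldl_append, ih]
    simp only [List.foldl_cons, List.foldl_nil]
    rw [cascade_replicate, List.replicate_succ']

-- main invariant: A's loop at position k, with an all-equal prefix of length k+1,
-- computes B's fold of the whole current array.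
theorem loop_eq_alt (n : Nat) : ∀ (rest : List String) (a : String) (k : Nat),
    (List.replicate (k + 1) a ++ rest).length = n →
    make_small_loop (List.replicate (k + 1) a ++ rest) k
      = make_small_alt (List.replicate (k + 1) a ++ rest) := by
  induction n using Nat.strong_induction_on with
  | _ n ih =>
  intro rest
  induction rest with
  | nil =>
    intro a k hL
    rw [make_small_loop]
    rw [dif_neg (by simp only [List.append_nil, List.length_replicate]; omega)]
    simp [make_small_alt, foldl_cascade_replicate]
  | cons b t ihR =>
    intro a k hL
    have hsplit : List.replicate (k + 1) a ++ b :: t = List.replicate k a ++ a :: b :: t := by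
      rw [List.replicate_succ']; simp
    rw [make_small_loop]
    rw [dif_pos (by simp only [List.length_append, List.length_replicate, List.length_cons]; omega)]
    have hga : (List.replicate (k + 1) a ++ b :: t).getD k "" = a := by
      rw [hsplit, List.getD_eq_getElem?_getD,
        List.getElem?_append_right (by simp)]
      simp
    have hgb : (List.replicate (k + 1) a ++ b :: t).getD (k + 1) "" = b := by
      rw [List.getD_eq_getElem?_getD, List.getElem?_append_right (by simp)]
      simp
    rw [hga, hgb]
    by_cases hab : a = b
    · rw [if_neg (by simp [hab])]
      subst hab
      have hrepl : List.replicate (k + 1) a ++ a :: t = List.replicate (k + 1 + 1) a ++ t := by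
        rw [List.replicate_succ' (n := k + 1)]; simp
      rw [hrepl]
      exact ihR a (k + 1) (by rw [← hL, hrepl])
    · rw [if_pos (by simp [hab])]
      have htake : (List.replicate (k + 1) a ++ b :: t).take k = List.replicate k a := by
        simp [List.take_append, List.take_replicate]
      have hdrop : (List.replicate (k + 1) a ++ b :: t).drop (k + 2) = t := by
        simp [List.drop_append, List.drop_replicate]
      rw [htake, hdrop]
      have key : make_small_alt (List.replicate k a ++ get_color [a, b] :: t)
          = make_small_alt (List.replicate (k + 1) a ++ b :: t) := by
        unfold make_small_alt
        congr 1
        rw [List.foldl_append, List.foldl_append, foldl_cascade_replicate,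
          foldl_cascade_replicate]
        simp only [List.foldl_cons]
        congr 1
        rw [List.replicate_succ]
        simp [cascade, hab]
      rw [← key]
      cases k with
      | zero =>
        exact ih (1 + t.length)
          (by rw [← hL]; simp only [List.length_append, List.length_replicate,
            List.length_cons]; omega) t (get_color [a, b]) 0
          (by simp only [List.length_append, List.length_replicate])
      | succ m =>
        have hre : List.replicate (m + 1) a ++ get_color [a, b] :: t
            = List.replicate (0 + 1) a ++ (List.replicate m a ++ get_color [a, b] :: t) := by
          rw [List.replicate_succ]; simp
        rw [hre]
        exact ih (m + 2 + t.length)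
          (by rw [← hL]; simp only [List.length_append, List.length_replicate,
            List.length_cons]; omega)
          (List.replicate m a ++ get_color [a, b] :: t) a 0
          (by simp only [List.length_append, List.length_replicate, List.length_cons]; omega)

-- ===== VERDICT (by name: the statement is the Claim_ definition above) =====
theorem make_small_spec : Claim_equal_make_small := by
  intro arr _
  unfold Spec_make_small make_small
  cases arr with
  | nil =>
    rw [make_small_loop]
    simp [make_small_alt]
  | cons x xs =>
    have := loop_eq_alt (x :: xs).length xs x 0 (by simp)
    simpa using this
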